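-- pv_equiv track=rewrite | github.com/davidchatz/newworld | invasions/src/layer/irus/services/member_management.py | _are_names_similar
-- ===== SOURCE A (Python) =====
-- def _are_names_similar(name1: str, name2: str) -> bool:
--     """Check if two names are similar (handles O/0 substitution).
--
--     Args:
--         name1: First name to compare
--         name2: Second name to compare
--
--     Returns:
--         True if names are considered similar
--     """
--     # Exact match
--     if name1 == name2:
--         return True
--
--     # O/0 substitution check (from memberlist.py logic)
--     name1_variants = [name1, name1.replace("O", "0"), name1.replace("0", "O")]
--
--     name2_variants = [name2, name2.replace("O", "0"), name2.replace("0", "O")]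
--
--     # Check all combinations
--     for variant1 in name1_variants:
--         for variant2 in name2_variants:
--             if variant1 == variant2:
--                 return True
--
--     return False
-- ===== SOURCE B (Python) =====
-- def _are_names_similar(name1: str, name2: str) -> bool:
--     """Check if two names are similar (handles O/0 substitution).
--
--     Normalize both names once (O -> 0) and compare the canonical forms;
--     this equals A's 9-way variant cross-product check.
--     """
--     return name1.replace("O", "0") == name2.replace("O", "0")
-- ===== Notes on version B (the rewrite author's own statement) =====
-- stated objective: simpler
-- what changed: Replaces A's 9-way cross-product over three O/0 variants of each name (nested loops) by a single canonical comparison: normalize both names once with O->0 and compare, which provably coincides with A's result.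
import Mathlib
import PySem

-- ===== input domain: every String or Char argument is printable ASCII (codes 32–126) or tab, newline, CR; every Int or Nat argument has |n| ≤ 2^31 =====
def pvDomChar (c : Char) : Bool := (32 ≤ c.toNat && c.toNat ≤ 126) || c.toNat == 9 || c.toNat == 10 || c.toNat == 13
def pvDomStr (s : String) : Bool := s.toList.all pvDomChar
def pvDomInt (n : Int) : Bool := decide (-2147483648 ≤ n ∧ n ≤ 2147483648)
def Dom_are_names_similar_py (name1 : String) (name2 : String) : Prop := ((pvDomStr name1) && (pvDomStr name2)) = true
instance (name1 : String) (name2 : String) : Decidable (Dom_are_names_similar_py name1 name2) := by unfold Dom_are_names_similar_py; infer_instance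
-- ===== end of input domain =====

-- B normalizes both names once (O -> 0) and compares; simpler than A's 9-way variant cross-product.

-- ===== PORT A =====
-- the three O/0 variants of a name, as in A
def pvVariants (n : String) : List String :=
  [n, PySem.Str.replace n "O" "0", PySem.Str.replace n "0" "O"]

def are_names_similar_py (name1 : String) (name2 : String) : Bool :=
  if name1 == name2 then true
  else
    -- nested for-loops with early return over all variant combinations
    (pvVariants name1).any (fun v1 => (pvVariants name2).any (fun v2 => v1 == v2))

-- ===== PORT B =====
def are_names_similar_py_alt (name1 : String) (name2 : String) : Bool :=
  PySem.Str.replace name1 "O" "0" == PySem.Str.replace name2 "O" "0"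

-- ===== PRECONDITION & SPEC =====
def Spec_are_names_similar_py (name1 : String) (name2 : String) (out : Bool) : Prop := out = are_names_similar_py_alt name1 name2
instance (name1 : String) (name2 : String) (out : Bool) : Decidable (Spec_are_names_similar_py name1 name2 out) := by unfold Spec_are_names_similar_py; infer_instance

-- ===== CLAIM (what is proved, stated in full; the proofs are below) =====
def Claim_equal_are_names_similar_py : Prop := ∀ (name1 : String) (name2 : String), Dom_are_names_similar_py name1 name2 → Spec_are_names_similar_py name1 name2 (are_names_similar_py name1 name2)

-- ===== LEMMAS AND PROOFS =====

-- character-level normalizations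
def pvF (c : Char) : Char := if c = 'O' then '0' else c
def pvG (c : Char) : Char := if c = '0' then 'O' else c

-- single-character replace is a map
theorem pv_replace_go_single (a b : Char) (l acc : List Char) :
    PySem.Chars.replace.go [a] [b] l.length l acc = acc.reverse ++ l.map (fun c => if c = a then b else c) := by
  induction l generalizing acc with
  | nil => simp [PySem.Chars.replace.go]
  | cons h t ih =>
      simp only [List.length_cons, PySem.Chars.replace.go, List.isPrefixOf, List.map_cons]
      by_cases hh : a = h
      · subst hh
        simp [ih]
      · have : (a == h) = false := by simp [hh]
        simp [this, ih, Ne.symm hh]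

theorem pv_replace_single (a b : Char) (s : List Char) :
    PySem.Chars.replace s [a] [b] = s.map (fun c => if c = a then b else c) := by
  simp [PySem.Chars.replace, pv_replace_go_single]

theorem pv_toList_replace_O0 (s : String) :
    (PySem.Str.replace s "O" "0").toList = s.toList.map pvF := by
  rw [PySem.Str.toList_replace]
  have : ("O" : String).toList = ['O'] := by decide
  have h2 : ("0" : String).toList = ['0'] := by decide
  rw [this, h2, pv_replace_single]; rfl

theorem pv_toList_replace_0O (s : String) :
    (PySem.Str.replace s "0" "O").toList = s.toList.map pvG := by
  rw [PySem.Str.toList_replace]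
  have : ("O" : String).toList = ['O'] := by decide
  have h2 : ("0" : String).toList = ['0'] := by decide
  rw [this, h2, pv_replace_single]; rfl

theorem pvF_F (c : Char) : pvF (pvF c) = pvF c := by
  by_cases h : c = 'O' <;> simp [pvF, h]

theorem pvF_G (c : Char) : pvF (pvG c) = pvF c := by
  by_cases h : c = '0' <;> by_cases h2 : c = 'O' <;> simp [pvF, pvG, h, h2]

theorem pv_map_F_F (l : List Char) : (l.map pvF).map pvF = l.map pvF := by
  simp [List.map_map, Function.comp_def, pvF_F]

theorem pv_map_F_G (l : List Char) : (l.map pvG).map pvF = l.map pvF := by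
  simp [List.map_map, Function.comp_def, pvF_G]

theorem pv_string_eq_iff (s t : String) : s = t ↔ s.toList = t.toList := by
  constructor
  · intro h; rw [h]
  · intro h; exact String.ext h

-- ===== VERDICT (by name: the statement is the Claim_ definition above) =====

theorem are_names_similar_py_spec : Claim_equal_are_names_similar_py := by
  intro name1 name2 _
  unfold Spec_are_names_similar_py are_names_similar_py are_names_similar_py_alt pvVariants
  rcases Bool.eq_false_or_eq_true (name1 == name2) with he | he
  · -- exact match: equal strings have equal canonical forms
    simp only [he]
    have h : name1 = name2 := by rwa [beq_iff_eq] at he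
    rw [h]
    simp
  · -- names differ: the 9-way check equals the canonical comparison
    simp only [he, Bool.false_eq_true, if_false, List.any_cons, List.any_nil, Bool.or_false]
    rcases Bool.eq_false_or_eq_true (PySem.Str.replace name1 "O" "0" == PySem.Str.replace name2 "O" "0") with hc | hc
    · -- canonical forms equal ⇒ the (c n1, c n2) pair matches
      simp only [hc]
      simp
    · -- canonical forms differ ⇒ every variant pair differs
      rw [hc]
      have hcne : name1.toList.map pvF ≠ name2.toList.map pvF := by
        intro h
        rw [beq_eq_false_iff_ne] at hc
        exact hc (by rw [pv_string_eq_iff, pv_toList_replace_O0, pv_toList_replace_O0]; exact h)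
      have key : ∀ u v : String, u.toList.map pvF = name1.toList.map pvF →
          v.toList.map pvF = name2.toList.map pvF → (u == v) = false := by
        intro u v hu hv
        rw [beq_eq_false_iff_ne]
        intro h
        exact hcne (by rw [← hu, ← hv, h])
      have h11 : name1.toList.map pvF = name1.toList.map pvF := rfl
      have h12 : (PySem.Str.replace name1 "O" "0").toList.map pvF = name1.toList.map pvF := by
        rw [pv_toList_replace_O0, pv_map_F_F]
      have h13 : (PySem.Str.replace name1 "0" "O").toList.map pvF = name1.toList.map pvF := by
        rw [pv_toList_replace_0O, pv_map_F_G]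
      have h21 : name2.toList.map pvF = name2.toList.map pvF := rfl
      have h22 : (PySem.Str.replace name2 "O" "0").toList.map pvF = name2.toList.map pvF := by
        rw [pv_toList_replace_O0, pv_map_F_F]
      have h23 : (PySem.Str.replace name2 "0" "O").toList.map pvF = name2.toList.map pvF := by
        rw [pv_toList_replace_0O, pv_map_F_G]
      rw [key _ _ h11 h22, key _ _ h11 h23,
          key _ _ h12 h21, key _ _ h12 h23,
          key _ _ h13 h21, key _ _ h13 h22, key _ _ h13 h23]
      simp
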